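-- pv_equiv track=rewrite | github.com/CarlosBravoGarran/Airport-Manager | Plane_Taxiing/ASTARRodaje.py | are_valid_moves
-- ===== SOURCE A (Python) =====
-- def are_valid_moves(moves, initial_positions):
--     final_positions = [move[0] for move in moves]
--     if len(final_positions) != len(set(final_positions)):
--         return False
--     # Check for collisions
--     for i, final_pos in enumerate(final_positions):
--         for j, initial_pos in enumerate(initial_positions):
--             if i != j and final_pos == initial_positions[j] and final_positions[j] == initial_positions[i]:
--                 return False
--     return True
-- ===== SOURCE B (Python) =====
-- def are_valid_moves(moves, initial_positions):
--     seen = set()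
--     for move in moves:
--         fin = move[0]
--         if fin in seen:
--             return False
--         seen.add(fin)
--     # finals are now unique: map each target square back to the mover's origin
--     origin_of = dict(zip([move[0] for move in moves], initial_positions))
--     for ini, move in zip(initial_positions, moves):
--         fin = move[0]
--         if ini != fin and origin_of.get(ini) == fin:
--             return False
--     return True
-- ===== Notes on version B (the rewrite author's own statement) =====
-- stated objective: alternative
-- what changed: Duplicate targets are detected by an incremental seen-set with early return instead of a len-vs-set comparison, and swap collisions by a dict mapping each (unique) target square to its mover's origin with one lookup per plane, replacing A's nested rescan.
-- outside the precondition, e.g. on are_valid_moves([[(1, 1)], [(2, 2)]], [(2, 2), (1, 1), (1, 1)]): A returns False, B returns False; on are_valid_moves([[(1, 1)], [(2, 2)]], [(2, 2)]): A raises IndexError, B returns True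
import Mathlib
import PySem

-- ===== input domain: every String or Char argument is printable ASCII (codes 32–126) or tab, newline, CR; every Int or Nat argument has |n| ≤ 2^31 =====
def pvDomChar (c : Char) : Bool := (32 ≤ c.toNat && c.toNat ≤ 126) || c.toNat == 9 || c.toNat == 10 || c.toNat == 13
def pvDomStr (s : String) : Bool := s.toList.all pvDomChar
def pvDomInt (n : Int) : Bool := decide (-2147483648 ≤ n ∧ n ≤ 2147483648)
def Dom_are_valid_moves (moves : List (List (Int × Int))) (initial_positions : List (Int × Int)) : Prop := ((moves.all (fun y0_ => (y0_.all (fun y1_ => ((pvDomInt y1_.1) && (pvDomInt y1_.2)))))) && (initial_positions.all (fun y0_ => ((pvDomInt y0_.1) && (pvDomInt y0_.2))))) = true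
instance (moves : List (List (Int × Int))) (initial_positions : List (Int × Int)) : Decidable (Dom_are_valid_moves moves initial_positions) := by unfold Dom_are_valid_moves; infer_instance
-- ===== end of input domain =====

-- B detects duplicate targets with an incremental seen-set (early return) and swap
-- collisions with a dict from each unique target square to its mover's origin,
-- one lookup per plane, replacing A's nested rescan (alternative algorithm).


-- ===== PORT A =====
def are_valid_moves (moves : List (List (Int × Int))) (initial_positions : List (Int × Int)) : Bool :=
  let final_positions := moves.map (fun move => PySem.List.pyGetD move 0 (0, 0))
  if final_positions.length ≠ (PySem.Set.ofList final_positions).length then false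
  else if (PySem.List.enumerate final_positions 0).any (fun p =>
      (PySem.List.enumerate initial_positions 0).any (fun q =>
        p.1 != q.1 && p.2 == q.2 &&
          PySem.List.pyGetD final_positions q.1 (0, 0) == PySem.List.pyGetD initial_positions p.1 (0, 0)))
  then false
  else true

-- ===== PORT B =====
-- first loop of Source B: 'fin = move[0]; if fin in seen: return False; seen.add(fin)'
def bDupLoop : List (List (Int × Int)) → PySem.Set (Int × Int) → Bool
  | [], _ => false
  | move :: rest, seen =>
    let fin := PySem.List.pyGetD move 0 (0, 0)
    if PySem.Set.contains seen fin then true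
    else bDupLoop rest (PySem.Set.add seen fin)

-- second loop of Source B: 'if ini != fin and origin_of.get(ini) == fin: return False'
def bSwapLoop (origin_of : PySem.Dict (Int × Int) (Int × Int)) :
    List ((Int × Int) × List (Int × Int)) → Bool
  | [] => false
  | (ini, move) :: rest =>
    let fin := PySem.List.pyGetD move 0 (0, 0)
    if ini != fin && (PySem.Dict.get? origin_of ini == some fin) then true
    else bSwapLoop origin_of rest

def are_valid_moves_alt (moves : List (List (Int × Int))) (initial_positions : List (Int × Int)) : Bool :=
  if bDupLoop moves PySem.Set.empty then false
  else
    let origin_of := PySem.Dict.ofList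
      ((moves.map (fun move => PySem.List.pyGetD move 0 (0, 0))).zip initial_positions)
    if bSwapLoop origin_of (initial_positions.zip moves) then false
    else true

-- ===== PRECONDITION & SPEC =====
-- Pre_ excludes moves containing an empty move (move[0] raises IndexError) and mismatched-length
-- inputs whose surplus tail positions reappear in the other list, on which A's cross-indexing
-- final_positions[j]/initial_positions[i] is raise-prone (IndexError at data-dependent indices).
def Pre_are_valid_moves (moves : List (List (Int × Int))) (initial_positions : List (Int × Int)) : Prop :=
  (∀ m ∈ moves, m ≠ []) ∧
  (∀ p ∈ initial_positions.drop moves.length, p ∉ moves.map (fun m => m.headD (0, 0))) ∧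
  (∀ q ∈ (moves.map (fun m => m.headD (0, 0))).drop initial_positions.length, q ∉ initial_positions)
instance (moves : List (List (Int × Int))) (initial_positions : List (Int × Int)) : Decidable (Pre_are_valid_moves moves initial_positions) := by unfold Pre_are_valid_moves; infer_instance

def pvWitness_are_valid_moves : (List (List (Int × Int))) × (List (Int × Int)) :=
  ([[(1, 1)], [(2, 2)]], [(0, 0), (1, 1)])

def Spec_are_valid_moves (moves : List (List (Int × Int))) (initial_positions : List (Int × Int)) (out : Bool) : Prop := out = are_valid_moves_alt moves initial_positions
instance (moves : List (List (Int × Int))) (initial_positions : List (Int × Int)) (out : Bool) : Decidable (Spec_are_valid_moves moves initial_positions out) := by unfold Spec_are_valid_moves; infer_instance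

-- ===== CLAIM (what is proved, stated in full; the proofs are below) =====
def Claim_equal_are_valid_moves : Prop := ∀ (moves : List (List (Int × Int))) (initial_positions : List (Int × Int)), Dom_are_valid_moves moves initial_positions → Pre_are_valid_moves moves initial_positions → Spec_are_valid_moves moves initial_positions (are_valid_moves moves initial_positions)

-- ===== LEMMAS AND PROOFS =====

-- Python's set(xs) keeps first occurrences, so it is a sublist of xs
lemma ofList_sublist {α : Type} [BEq α] [LawfulBEq α] (xs : List α) : (PySem.Set.ofList xs).Sublist xs := by
  induction xs using List.reverseRecOn with
  | nil => simp [PySem.Set.ofList_nil]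
  | append_singleton xs x ih =>
    rw [PySem.Set.ofList_append_singleton, PySem.Set.add]
    split_ifs with h
    · exact ih.trans (List.sublist_append_left xs [x])
    · exact ih.append_right [x] |>.trans (by simp)

-- A's duplicate check passes iff the list of targets has no duplicates
lemma dedup_length_eq_iff {α : Type} [BEq α] [LawfulBEq α] (xs : List α) :
    (PySem.Set.ofList xs).length = xs.length ↔ xs.Nodup := by
  constructor
  · intro h
    have := (ofList_sublist xs).eq_of_length h
    rw [← this]; exact PySem.Set.nodup_ofList xs
  · intro h; rw [PySem.Set.ofList_eq_self_of_nodup xs h]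

-- B's first loop fires iff the targets (together with what is already seen) repeat
lemma bDupLoop_eq_false_iff (moves : List (List (Int × Int))) (seen : PySem.Set (Int × Int)) :
    bDupLoop moves seen = false ↔
      (moves.map (fun m => PySem.List.pyGetD m 0 (0, 0))).Nodup ∧
      ∀ x ∈ moves.map (fun m => PySem.List.pyGetD m 0 (0, 0)), x ∉ seen := by
  induction moves generalizing seen with
  | nil => simp [bDupLoop]
  | cons m rest ih =>
    by_cases hc : PySem.List.pyGetD m 0 (0, 0) ∈ seen
    · have hcc : PySem.Set.contains seen (PySem.List.pyGetD m 0 (0, 0)) = true := by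
        simpa [PySem.Set.contains, List.elem_iff] using hc
      simp only [bDupLoop, hcc, if_true, List.map_cons]
      constructor
      · intro hf; cases hf
      · rintro ⟨-, hall⟩; exact absurd hc (hall _ List.mem_cons_self)
    · have hcc : PySem.Set.contains seen (PySem.List.pyGetD m 0 (0, 0)) = false := by
        simpa [PySem.Set.contains, List.elem_iff] using hc
      simp only [bDupLoop, hcc, Bool.false_eq_true, if_false, List.map_cons, List.nodup_cons,
        List.mem_cons, ih]
      constructor
      · rintro ⟨hnd, hall⟩
        refine ⟨⟨fun hmem => absurd ((PySem.Set.mem_add _ _ _).2 (Or.inr rfl)) (hall _ hmem), hnd⟩, ?_⟩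
        rintro x (rfl | hx)
        · exact hc
        · exact fun hs => hall x hx ((PySem.Set.mem_add _ _ _).2 (Or.inl hs))
      · rintro ⟨⟨hni, hnd⟩, hall⟩
        refine ⟨hnd, fun x hx hadd => ?_⟩
        rcases (PySem.Set.mem_add _ _ _).1 hadd with hs | rfl
        · exact hall x (Or.inr hx) hs
        · exact hni hx

-- B's second loop is an 'any' over the zipped pairs
lemma bSwapLoop_eq_any (origin_of : PySem.Dict (Int × Int) (Int × Int))
    (l : List ((Int × Int) × List (Int × Int))) :
    bSwapLoop origin_of l = l.any (fun p =>
      p.1 != PySem.List.pyGetD p.2 0 (0, 0) &&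
      (PySem.Dict.get? origin_of p.1 == some (PySem.List.pyGetD p.2 0 (0, 0)))) := by
  induction l with
  | nil => rfl
  | cons p rest ih =>
    obtain ⟨ini, move⟩ := p
    simp only [bSwapLoop, List.any_cons, ← ih]
    split_ifs with h
    · simp [h]
    · simp [h]

-- dict(zip(keys, vals)) with distinct keys keeps exactly its pairs
lemma items_ofList_of_nodup {κ ν : Type} [BEq κ] [LawfulBEq κ] (ps : List (κ × ν))
    (h : (ps.map (·.1)).Nodup) : (PySem.Dict.ofList ps).items = ps := by
  have := PySem.Dict.items_foldl_insert_fresh (l := ps) (k := fun p => p.1) (v := fun p => p.2)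
    (d := PySem.Dict.empty) (fun a _ => PySem.Dict.contains_empty _) h
  simpa [PySem.Dict.ofList, PySem.Dict.update] using this

lemma get?_ofList_iff {κ ν : Type} [BEq κ] [LawfulBEq κ] (ps : List (κ × ν))
    (h : (ps.map (·.1)).Nodup) (k : κ) (v : ν) :
    (PySem.Dict.ofList ps).get? k = some v ↔ (k, v) ∈ ps := by
  rw [PySem.Dict.get?_eq_some_iff_mem_items _ _ _ (PySem.Dict.nodup_keys_ofList ps),
    items_ofList_of_nodup ps h]

-- the first components of a zip form a sublist of the first list
lemma map_fst_zip_sublist {α β : Type} (xs : List α) (ys : List β) :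
    ((xs.zip ys).map (·.1)).Sublist xs := by
  induction xs generalizing ys with
  | nil => simp
  | cons x xs ih =>
    cases ys with
    | nil => simp
    | cons y ys => simpa using List.Sublist.cons₂ x (ih ys)

-- membership in a zip, by index
lemma mem_zip_iff {α β : Type} (xs : List α) (ys : List β) (p : α × β) :
    p ∈ xs.zip ys ↔ ∃ (k : Nat) (h1 : k < xs.length) (h2 : k < ys.length), xs[k] = p.1 ∧ ys[k] = p.2 := by
  constructor
  · intro h
    obtain ⟨k, hk, he⟩ := List.getElem_of_mem h
    rw [List.getElem_zip] at he
    have hk' := hk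
    rw [List.length_zip] at hk'
    exact ⟨k, by omega, by omega, by rw [← he], by rw [← he]⟩
  · rintro ⟨k, h1, h2, e1, e2⟩
    have : (xs.zip ys)[k]'(by rw [List.length_zip]; omega) = p := by
      rw [List.getElem_zip]; rw [e1, e2]
    rw [← this]; exact List.getElem_mem _

-- under equal lengths and distinct targets A's nested scan and the reverse-edge test agree
lemma scan_iff (finals initial_positions : List (Int × Int))
    (hf : ∀ p ∈ initial_positions.drop finals.length, p ∉ finals)
    (hg : ∀ q ∈ finals.drop initial_positions.length, q ∉ initial_positions)
    (hnd : finals.Nodup) :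
    ((PySem.List.enumerate finals 0).any (fun p =>
      (PySem.List.enumerate initial_positions 0).any (fun q =>
        p.1 != q.1 && p.2 == q.2 &&
          PySem.List.pyGetD finals q.1 (0, 0) == PySem.List.pyGetD initial_positions p.1 (0, 0))))
    = ((initial_positions.zip finals).any (fun p =>
        p.1 != p.2 && decide ((p.1, p.2) ∈ finals.zip initial_positions))) := by
  rw [Bool.eq_iff_iff]
  simp only [List.any_eq_true, PySem.List.mem_enumerate_iff, Bool.and_eq_true, bne_iff_ne,
    beq_iff_eq, ne_eq, zero_add, decide_eq_true_eq]
  have hg1 : ∀ (k : Nat) (hk : k < finals.length),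
      PySem.List.pyGetD finals (k : Int) (0, 0) = finals[k]'hk := by
    intro k hk; simp [PySem.List.pyGetD_natCast, hk]
  have hg2 : ∀ (k : Nat) (hk : k < initial_positions.length),
      PySem.List.pyGetD initial_positions (k : Int) (0, 0) = initial_positions[k]'hk := by
    intro k hk; simp [PySem.List.pyGetD_natCast, hk]
  constructor
  · rintro ⟨x, ⟨i, hi, rfl⟩, y, ⟨j, hj, rfl⟩, ⟨hne, heq⟩, hswap⟩
    simp only at hne heq hswap
    have hij : i ≠ j := by intro h; exact hne (by rw [h])
    have hjf : j < finals.length := by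
      by_contra h
      refine hf (initial_positions[j]) ?_ (by rw [← heq]; exact List.getElem_mem hi)
      rw [List.mem_iff_getElem]
      exact ⟨j - finals.length, by simp; omega, by rw [List.getElem_drop]; congr 1; omega⟩
    have hii : i < initial_positions.length := by
      by_contra h
      refine hg (finals[i]) ?_ (by rw [heq]; exact List.getElem_mem hj)
      rw [List.mem_iff_getElem]
      exact ⟨i - initial_positions.length, by simp; omega, by rw [List.getElem_drop]; congr 1; omega⟩
    rw [hg1 j hjf, hg2 i hii] at hswap
    by_cases hstat : initial_positions[i]'(by omega) = finals[i]
    · exfalso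
      have : finals[j]'(by omega) = finals[i] := by rw [hswap, hstat]
      exact hij ((List.Nodup.getElem_inj_iff hnd).1 this.symm)
    · refine ⟨(initial_positions[i]'(by omega), finals[i]), (mem_zip_iff _ _ _).2 ⟨i, by omega, by omega, rfl, rfl⟩,
        hstat, (mem_zip_iff _ _ _).2 ⟨j, by omega, by omega, ?_, ?_⟩⟩
      · simpa using hswap
      · simpa using heq.symm
  · rintro ⟨x, hx, hne, hrev⟩
    obtain ⟨k, hk1, hk2, ek1, ek2⟩ := (mem_zip_iff _ _ _).1 hx
    obtain ⟨j, hj1, hj2, ej1, ej2⟩ := (mem_zip_iff _ _ _).1 hrev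
    have hkj : k ≠ j := by
      intro h; subst h; exact hne (ej1.symm.trans ek2)
    refine ⟨(k, finals[k]), ⟨k, by omega, rfl⟩, (j, initial_positions[j]'(by omega)),
      ⟨j, by omega, rfl⟩, ⟨?_, ?_⟩, ?_⟩
    · simp only; intro h
      exact hkj (by exact_mod_cast h)
    · simp only [ek2, ej2]
    · simp only
      rw [hg1 j (by omega), hg2 k (by omega), ej1, ek1]

-- ===== VERDICT (by name: the statement is the Claim_ definition above) =====
theorem are_valid_moves_spec : Claim_equal_are_valid_moves := by
  intro moves initial_positions _ hpre
  obtain ⟨hne, hf, hg⟩ := hpre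
  unfold Spec_are_valid_moves are_valid_moves are_valid_moves_alt
  simp only
  set finals := moves.map (fun move => PySem.List.pyGetD move 0 (0, 0)) with hfin
  have hmap : finals = moves.map (fun m => m.headD (0, 0)) := by
    rw [hfin]
    refine List.map_congr_left (fun m hm => ?_)
    cases m with
    | nil => exact absurd rfl (hne [] hm)
    | cons x t => simp [PySem.List.pyGetD]
  have hlenf : finals.length = moves.length := by simp [hfin]
  rw [← hmap] at hf hg
  rw [← hlenf] at hf
  have hdupB : bDupLoop moves PySem.Set.empty = false ↔ finals.Nodup := by
    rw [bDupLoop_eq_false_iff]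
    simp [PySem.Set.empty, ← hfin]
  by_cases hnd : finals.Nodup
  · have hA : ¬ finals.length ≠ (PySem.Set.ofList finals).length := by
      rw [(dedup_length_eq_iff finals).2 hnd]; simp
    simp only [hA, if_false, hdupB.2 hnd, Bool.false_eq_true, if_false]
    -- rewrite B's loop into an 'any' over zipped (initial, final) pairs
    rw [bSwapLoop_eq_any]
    have hznd : ((finals.zip initial_positions).map (·.1)).Nodup :=
      hnd.sublist (map_fst_zip_sublist finals initial_positions)
    have hB : (initial_positions.zip moves).any (fun p =>
        p.1 != PySem.List.pyGetD p.2 0 (0, 0) &&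
        (PySem.Dict.get? (PySem.Dict.ofList (finals.zip initial_positions)) p.1 ==
          some (PySem.List.pyGetD p.2 0 (0, 0)))) =
      (initial_positions.zip finals).any (fun p =>
        p.1 != p.2 && decide ((p.1, p.2) ∈ finals.zip initial_positions)) := by
      have hz : initial_positions.zip finals =
          (initial_positions.zip moves).map (fun p => (p.1, PySem.List.pyGetD p.2 0 (0, 0))) := by
        rw [hfin, List.zip_map_right]
        exact List.map_congr_left fun p _ => rfl
      rw [hz, List.any_map]
      refine PySem.List.any_congr_mem (fun p _ => ?_)
      simp only [Function.comp]
      congr 1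
      rw [Bool.eq_iff_iff, beq_iff_eq, decide_eq_true_eq]
      exact get?_ofList_iff _ hznd _ _
    rw [hB, scan_iff finals initial_positions hf hg hnd]
  · have hA : finals.length ≠ (PySem.Set.ofList finals).length := by
      intro h; exact hnd ((dedup_length_eq_iff finals).1 h.symm)
    have hB : bDupLoop moves PySem.Set.empty = true := by
      by_contra h
      exact hnd (hdupB.1 (by revert h; cases bDupLoop moves PySem.Set.empty <;> simp))
    have hB' : bDupLoop moves [] = true := hB
    simp [hA, hB']
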